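-- pv_equiv track=rewrite | github.com/bwolfe502/PACbot | actions/quests.py | _deduplicate_quests
-- ===== SOURCE A (Python) =====
-- def _deduplicate_quests(quests):
--     """Deduplicate quest list by type, keeping the entry with the most remaining.
--     Each rally counts toward ALL quests of the same type (alliance + side),
--     so we only need max(remaining) rallies per type.
--     Returns a new list with at most one quest per quest_type."""
--     best_by_type = {}
--     for q in quests:
--         qt = q["quest_type"]
--         remaining = q["target"] - q["current"]
--         prev = best_by_type.get(qt)
--         if prev is None or remaining > (prev["target"] - prev["current"]):
--             best_by_type[qt] = q
--     return list(best_by_type.values())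
-- ===== SOURCE B (Python) =====
-- def _deduplicate_quests(quests):
--     """Deduplicate quest list by type, keeping the entry with the most remaining.
--     Group-then-reduce: bucket quests by type in encounter order, then pick the
--     best of each bucket (max returns the first maximal element, matching the
--     strict '>' first-wins behaviour of the running-best version)."""
--     buckets = {}
--     for q in quests:
--         buckets.setdefault(q["quest_type"], []).append(q)
--     return [max(bucket, key=lambda q: q["target"] - q["current"])
--             for bucket in buckets.values()]
-- ===== Notes on version B (the rewrite author's own statement) =====
-- stated objective: alternative
-- what changed: Replaces the online running-best fold over one dict with a group-then-reduce: a first pass buckets quests by type (setdefault/append, preserving encounter order), then a comprehension picks max(bucket, key=remaining) per bucket; first-maximal max matches the strict '>' first-wins rule.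
import Mathlib
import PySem

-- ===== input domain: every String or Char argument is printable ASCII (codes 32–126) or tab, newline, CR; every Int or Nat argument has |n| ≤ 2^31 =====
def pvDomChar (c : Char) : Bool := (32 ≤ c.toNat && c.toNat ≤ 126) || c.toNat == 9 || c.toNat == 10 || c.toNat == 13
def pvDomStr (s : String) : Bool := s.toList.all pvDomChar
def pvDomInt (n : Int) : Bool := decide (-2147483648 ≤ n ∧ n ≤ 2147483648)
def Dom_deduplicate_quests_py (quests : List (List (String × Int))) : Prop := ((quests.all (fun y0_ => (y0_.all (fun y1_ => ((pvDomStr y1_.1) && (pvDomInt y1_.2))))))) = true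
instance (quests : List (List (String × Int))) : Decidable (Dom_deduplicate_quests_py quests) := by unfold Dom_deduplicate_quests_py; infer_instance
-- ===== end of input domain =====

-- B replaces A's online running-best fold by a group-then-reduce (bucket quests by type, then
-- take the first maximal element of each bucket); same cost, different decomposition.


-- ===== PORT A =====
-- shared lookup helper: q[k] on a quest dict; the `.getD 0` default is unreachable under
-- Pre_deduplicate_quests_py (a missing key is Python's KeyError, excluded by Pre_)
def qGetD (q : List (String × Int)) (k : String) : Int :=
  ((PySem.Dict.mk q).get? k).getD 0

-- one iteration of A's `for q in quests` loop over the running-best dict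
def aStep (best_by_type : PySem.Dict Int (List (String × Int))) (q : List (String × Int)) :
    PySem.Dict Int (List (String × Int)) :=
  let qt := qGetD q "quest_type"
  let remaining := qGetD q "target" - qGetD q "current"
  match best_by_type.get? qt with
  | none => best_by_type.insert qt q                        -- prev is None
  | some prev =>
      if qGetD prev "target" - qGetD prev "current" < remaining then best_by_type.insert qt q
      else best_by_type

def deduplicate_quests_py (quests : List (List (String × Int))) : List (List (String × Int)) :=
  (quests.foldl aStep PySem.Dict.empty).values

-- ===== PORT B =====
-- Source B's `lambda q: q["target"] - q["current"]` key
def qRem (q : List (String × Int)) : Int := qGetD q "target" - qGetD q "current"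

-- one iteration of Source B's bucketing loop: buckets.setdefault(q["quest_type"], []).append(q)
def bStep (buckets : PySem.Dict Int (List (List (String × Int)))) (q : List (String × Int)) :
    PySem.Dict Int (List (List (String × Int))) :=
  buckets.modify (qGetD q "quest_type") [] (· ++ [q])

def deduplicate_quests_py_alt (quests : List (List (String × Int))) : List (List (String × Int)) :=
  let buckets := quests.foldl bStep PySem.Dict.empty
  -- max(bucket, key=qRem); `.getD []` is unreachable: every bucket is nonempty
  buckets.values.map (fun bucket => (PySem.List.max? bucket qRem).getD [])

-- ===== PRECONDITION & SPEC =====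
-- Pre_ excludes exactly the inputs on which Python A raises KeyError: a quest missing one of
-- the keys "quest_type", "target", "current".
def Pre_deduplicate_quests_py (quests : List (List (String × Int))) : Prop :=
  ∀ q ∈ quests, ((PySem.Dict.mk q).contains "quest_type" = true) ∧
    ((PySem.Dict.mk q).contains "target" = true) ∧ ((PySem.Dict.mk q).contains "current" = true)
instance (quests : List (List (String × Int))) : Decidable (Pre_deduplicate_quests_py quests) := by
  unfold Pre_deduplicate_quests_py; infer_instance

def pvWitness_deduplicate_quests_py : (List (List (String × Int))) :=
  [[("quest_type", 1), ("target", 5), ("current", 2)], [("quest_type", 1), ("target", 9), ("current", 3)]]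

def Spec_deduplicate_quests_py (quests : List (List (String × Int))) (out : List (List (String × Int))) : Prop := out = deduplicate_quests_py_alt quests
instance (quests : List (List (String × Int))) (out : List (List (String × Int))) : Decidable (Spec_deduplicate_quests_py quests out) := by unfold Spec_deduplicate_quests_py; infer_instance

-- ===== CLAIM (what is proved, stated in full; the proofs are below) =====
def Claim_equal_deduplicate_quests_py : Prop := ∀ (quests : List (List (String × Int))), Dom_deduplicate_quests_py quests → Pre_deduplicate_quests_py quests → Spec_deduplicate_quests_py quests (deduplicate_quests_py quests)

-- ===== LEMMAS AND PROOFS =====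

-- A's running best, started from an arbitrary accumulator (aFold none l = max? l qRem by rfl)
def aFold (o : Option (List (String × Int))) (l : List (List (String × Int))) :
    Option (List (String × Int)) :=
  l.foldl (fun acc q => match acc with
    | none => some q
    | some p => if qRem p < qRem q then some q else some p) o

theorem aFold_none_eq_max? (l : List (List (String × Int))) :
    aFold none l = PySem.List.max? l qRem := by
  unfold aFold PySem.List.max?
  exact PySem.List.foldl_congr_mem _ _ _ _ (fun acc x _ => by cases acc <;> rfl)

theorem aFold_cons (o : Option (List (String × Int))) (q : List (String × Int))
    (l : List (List (String × Int))) :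
    aFold o (q :: l) = aFold (match o with
      | none => some q
      | some p => if qRem p < qRem q then some q else some p) l := rfl

theorem get?_foldA (l : List (List (String × Int))) (d : PySem.Dict Int (List (String × Int)))
    (k : Int) :
    (l.foldl aStep d).get? k
      = aFold (d.get? k) (l.filter (fun q => qGetD q "quest_type" == k)) := by
  induction l generalizing d with
  | nil => rfl
  | cons q t ih =>
      simp only [List.foldl_cons, List.filter_cons]
      rw [ih]
      by_cases hk : qGetD q "quest_type" = k
      · subst hk
        simp only [beq_self_eq_true, if_pos]
        rw [aFold_cons]
        congr 1
        simp only [aStep, qRem]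
        cases hd : d.get? (qGetD q "quest_type") with
        | none => simp [PySem.Dict.get?_insert_self]
        | some prev =>
            dsimp only
            split_ifs with h
            · simp [PySem.Dict.get?_insert_self]
            · exact hd
      · have hbeq : (qGetD q "quest_type" == k) = false := by
          simp [hk]
        simp only [hbeq, if_neg Bool.false_ne_true]
        congr 1
        unfold aStep
        cases hd : d.get? (qGetD q "quest_type") with
        | none =>
            simp only [hd]
            exact PySem.Dict.get?_insert_of_ne d q (Ne.symm hk)
        | some prev =>
            simp only [hd]
            split_ifs with h
            · exact PySem.Dict.get?_insert_of_ne d q (Ne.symm hk)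
            · rfl

theorem keys_foldA (l : List (List (String × Int))) (d : PySem.Dict Int (List (String × Int))) :
    (l.foldl aStep d).keys
      = PySem.Set.update d.keys (l.map (fun q => qGetD q "quest_type")) := by
  induction l generalizing d with
  | nil => rfl
  | cons q t ih =>
      simp only [List.foldl_cons, List.map_cons, PySem.Set.update_cons]
      rw [ih]
      congr 1
      unfold aStep
      cases hd : d.get? (qGetD q "quest_type") with
      | none =>
          have hc : d.contains (qGetD q "quest_type") = false := by
            rw [PySem.Dict.contains_eq_isSome_get?, hd]; rfl
          simp only [hd]
          rw [PySem.Dict.keys_insert_of_not_contains _ _ hc,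
              PySem.Set.add_of_not_mem]
          intro hmem
          rw [← PySem.Dict.contains_iff_mem_keys] at hmem
          simp [hc] at hmem
      | some prev =>
          have hc : d.contains (qGetD q "quest_type") = true := by
            rw [PySem.Dict.contains_eq_isSome_get?, hd]; rfl
          have hmem : qGetD q "quest_type" ∈ d.keys :=
            (PySem.Dict.contains_iff_mem_keys d _).mp hc
          simp only [hd]
          split_ifs with h
          · rw [PySem.Dict.keys_insert_of_contains _ _ hc, PySem.Set.add_of_mem hmem]
          · rw [PySem.Set.add_of_mem hmem]

-- B's bucket fold rewritten as the pair-fold the PySem grouping lemmas speak about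
theorem foldB_eq_pairs (quests : List (List (String × Int)))
    (d : PySem.Dict Int (List (List (String × Int)))) :
    quests.foldl bStep d
      = (quests.map (fun q => (qGetD q "quest_type", q))).foldl
          (fun b p => b.modify p.1 [] (· ++ [p.2])) d := by
  rw [List.foldl_map]
  rfl

theorem filter_pairs (quests : List (List (String × Int))) (k : Int) :
    ((quests.map (fun q => (qGetD q "quest_type", q))).filter
        (fun p : Int × List (String × Int) => p.1 == k)).map
      (fun p : Int × List (String × Int) => p.2)
      = quests.filter (fun q => qGetD q "quest_type" == k) := by
  rw [List.filter_map, List.map_map]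
  simp [Function.comp_def]

-- ===== VERDICT (by name: the statement is the Claim_ definition above) =====
theorem deduplicate_quests_py_spec : Claim_equal_deduplicate_quests_py := by
  intro quests _ _
  unfold Spec_deduplicate_quests_py
  show (quests.foldl aStep PySem.Dict.empty).values
      = (quests.foldl bStep PySem.Dict.empty).values.map
          (fun bucket => (PySem.List.max? bucket qRem).getD [])
  -- names for the two dicts
  set keyf : List (String × Int) → Int := fun q => qGetD q "quest_type" with hkeyf
  -- A side: keys and per-key values
  have hAkeys : (quests.foldl aStep PySem.Dict.empty).keys
      = PySem.Set.ofList (quests.map keyf) := by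
    rw [keys_foldA]
    simp [PySem.Set.update_nil_left, PySem.Dict.keys_empty, hkeyf]
  have hAnodup : (quests.foldl aStep PySem.Dict.empty).keys.Nodup := by
    rw [hAkeys]; exact PySem.Set.nodup_ofList _
  -- B side: keys and per-key buckets
  have hBfold := foldB_eq_pairs quests PySem.Dict.empty
  have hBkeys : (quests.foldl bStep PySem.Dict.empty).keys
      = PySem.Set.ofList (quests.map keyf) := by
    have h := PySem.Dict.keys_foldl_modify_key quests (fun q => qGetD q "quest_type")
      ([] : List (List (String × Int))) (fun _ q v => v ++ [q]) PySem.Dict.empty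
    simpa [bStep, PySem.Set.update_nil_left, PySem.Dict.keys_empty, hkeyf] using h
  have hBnodup : (quests.foldl bStep PySem.Dict.empty).keys.Nodup := by
    rw [hBkeys]; exact PySem.Set.nodup_ofList _
  rw [PySem.Dict.values_eq_map_keys _ hAnodup [],
      PySem.Dict.values_eq_map_keys _ hBnodup [],
      hAkeys, hBkeys, List.map_map]
  apply List.map_congr_left
  intro k hk
  -- A's entry at k
  have hA : (quests.foldl aStep PySem.Dict.empty).getD k []
      = (PySem.List.max? (quests.filter (fun q => keyf q == k)) qRem).getD [] := by
    rw [PySem.Dict.getD_eq_get?_getD, get?_foldA, PySem.Dict.get?_empty, aFold_none_eq_max?]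
  -- B's entry at k
  have hB : (quests.foldl bStep PySem.Dict.empty).getD k []
      = quests.filter (fun q => keyf q == k) := by
    rw [hBfold, PySem.Dict.getD_foldl_modify_append, PySem.Dict.getD_empty, filter_pairs]
    simp [hkeyf]
  -- both sides are max? of the same filtered sublist (on an empty filter both default to [])
  rw [hA, Function.comp_apply, hB]
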